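-- pv_equiv track=rewrite | github.com/NikolovSp/Fundamental_Python_SoftUni | text_processing_exercise/02_character_multiplier_2.py | ascii_sum_char
-- ===== SOURCE A (Python) =====
-- def ascii_sum_char(first_word, second_word):
--     num = 0
--     sum = 0
--     if len(first_word) > len(second_word):
--         index = len(first_word)
--     else:
--         index = len(second_word)
--
--     for i in range(index):
--         if (len(first_word) - 1) < i <= (len(second_word) - 1):
--             sum += ord(second_word[i])
--         elif (len(first_word) - 1) >= i > (len(second_word) - 1):
--             sum += ord(first_word[i])
--         else:
--             sum += ord(first_word[i]) * ord(second_word[i])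
--     return sum
-- ===== SOURCE B (Python) =====
-- def ascii_sum_char(first_word, second_word):
--     total = sum(ord(a) * ord(b) for a, b in zip(first_word, second_word))
--     longer = first_word if len(first_word) > len(second_word) else second_word
--     ml = min(len(first_word), len(second_word))
--     total += sum(ord(c) for c in longer[ml:])
--     return total
-- ===== Notes on version B (the rewrite author's own statement) =====
-- stated objective: faster
-- what changed: Replaced the single indexed loop with three per-index range comparisons and repeated subscripting by two direct passes: a paired sum over zip(first_word, second_word) for the overlap, plus a sum over the longer word's tail slice.
import Mathlib
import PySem

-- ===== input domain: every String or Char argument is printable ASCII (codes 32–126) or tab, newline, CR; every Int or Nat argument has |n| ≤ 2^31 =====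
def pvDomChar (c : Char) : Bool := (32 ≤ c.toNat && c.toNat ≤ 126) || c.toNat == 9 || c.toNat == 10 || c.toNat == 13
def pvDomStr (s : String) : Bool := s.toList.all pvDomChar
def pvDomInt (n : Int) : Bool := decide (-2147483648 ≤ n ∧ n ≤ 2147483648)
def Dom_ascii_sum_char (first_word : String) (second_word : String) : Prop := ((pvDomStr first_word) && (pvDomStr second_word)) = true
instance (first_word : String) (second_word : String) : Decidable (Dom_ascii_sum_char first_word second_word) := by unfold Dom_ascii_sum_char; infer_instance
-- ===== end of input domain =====

-- B replaces A's single indexed loop (three range-comparison branches per index) by two passes: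
-- a paired sum over the zipped overlap plus a sum over the longer word's tail (same asymptotic cost, fewer per-index branch tests and subscripts).

-- ===== PORT A =====
-- literal transliteration of A; every branch guards its own index, so the Python never raises and no Pre_ is needed
def ascii_sum_char (first_word : String) (second_word : String) : Int :=
  let f := first_word.toList
  let s := second_word.toList
  let index : Int := if (f.length : Int) > (s.length : Int) then (f.length : Int) else (s.length : Int)
  (PySem.List.pyRange 0 index 1).foldl
    (fun sum i =>
      if (f.length : Int) - 1 < i ∧ i ≤ (s.length : Int) - 1 then
        sum + ((PySem.List.pyGet? s i).map (fun c => (c.toNat : Int))).getD 0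
      else if (f.length : Int) - 1 ≥ i ∧ i > (s.length : Int) - 1 then
        sum + ((PySem.List.pyGet? f i).map (fun c => (c.toNat : Int))).getD 0
      else
        sum + ((PySem.List.pyGet? f i).map (fun c => (c.toNat : Int))).getD 0
              * ((PySem.List.pyGet? s i).map (fun c => (c.toNat : Int))).getD 0) 0

-- ===== PORT B =====
-- transliteration of Source B: zipped overlap sum, then the longer word's tail slice longer[ml:]
-- (ml = min length is a nonnegative Nat, so the slice is List.drop ml, cf. PySem.List.slice_from_natCast)
def ascii_sum_char_alt (first_word : String) (second_word : String) : Int :=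
  let f := first_word.toList
  let s := second_word.toList
  let total : Int := ((f.zip s).map (fun ab => (ab.1.toNat : Int) * (ab.2.toNat : Int))).sum
  let longer := if f.length > s.length then f else s
  let ml := min f.length s.length
  total + ((longer.drop ml).map (fun c => (c.toNat : Int))).sum

-- ===== PRECONDITION & SPEC =====
def Spec_ascii_sum_char (first_word : String) (second_word : String) (out : Int) : Prop := out = ascii_sum_char_alt first_word second_word
instance (first_word : String) (second_word : String) (out : Int) : Decidable (Spec_ascii_sum_char first_word second_word out) := by unfold Spec_ascii_sum_char; infer_instance

-- ===== CLAIM (what is proved, stated in full; the proofs are below) =====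
def Claim_equal_ascii_sum_char : Prop := ∀ (first_word : String) (second_word : String), Dom_ascii_sum_char first_word second_word → Spec_ascii_sum_char first_word second_word (ascii_sum_char first_word second_word)

-- ===== LEMMAS AND PROOFS =====

def pvT (f s : List Char) (i : Int) : Int :=
  if (f.length : Int) - 1 < i ∧ i ≤ (s.length : Int) - 1 then
    ((PySem.List.pyGet? s i).map (fun c => (c.toNat : Int))).getD 0
  else if (f.length : Int) - 1 ≥ i ∧ i > (s.length : Int) - 1 then
    ((PySem.List.pyGet? f i).map (fun c => (c.toNat : Int))).getD 0
  else
    ((PySem.List.pyGet? f i).map (fun c => (c.toNat : Int))).getD 0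
      * ((PySem.List.pyGet? s i).map (fun c => (c.toNat : Int))).getD 0

lemma pvT_shift (x y : Char) (f s : List Char) (k : Nat) :
    pvT (x :: f) (y :: s) ((k : Int) + 1) = pvT f s k := by
  simp only [pvT, List.length_cons, PySem.List.pyGet?_cons_succ]
  split_ifs <;> first | rfl | (push_cast at * ; omega)

lemma pvSum_shift (t : Nat → Int) (m : Nat) :
    ((List.range (m + 1)).map t).sum = t 0 + ((List.range m).map (fun k => t (k + 1))).sum := by
  rw [List.range_succ_eq_map]
  simp [Function.comp_def]

lemma pvT_shift_nil_right (x : Char) (f : List Char) (k : Nat) :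
    pvT (x :: f) [] ((k : Int) + 1) = pvT f [] k := by
  simp only [pvT, List.length_cons, List.length_nil, PySem.List.pyGet?_cons_succ]
  have h1 : PySem.List.pyGet? ([] : List Char) ((k : Int) + 1) = none := by
    simp [PySem.List.pyGet?_eq_none_iff, PySem.Raise.InRange]
  have h2 : PySem.List.pyGet? ([] : List Char) ((k : Int)) = none := by
    simp [PySem.List.pyGet?_eq_none_iff, PySem.Raise.InRange]
  rw [h1, h2]
  split_ifs <;> first | rfl | (push_cast at * ; omega)

lemma pvT_shift_nil_left (y : Char) (s : List Char) (k : Nat) :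
    pvT [] (y :: s) ((k : Int) + 1) = pvT [] s k := by
  simp only [pvT, List.length_cons, List.length_nil, PySem.List.pyGet?_cons_succ]
  have h1 : PySem.List.pyGet? ([] : List Char) ((k : Int) + 1) = none := by
    simp [PySem.List.pyGet?_eq_none_iff, PySem.Raise.InRange]
  have h2 : PySem.List.pyGet? ([] : List Char) ((k : Int)) = none := by
    simp [PySem.List.pyGet?_eq_none_iff, PySem.Raise.InRange]
  rw [h1, h2]
  split_ifs <;> first | rfl | (push_cast at * ; omega)

def pvG : List Char → List Char → Int
  | [], [] => 0
  | a :: f, [] => (a.toNat : Int) + pvG f []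
  | [], b :: s => (b.toNat : Int) + pvG [] s
  | a :: f, b :: s => (a.toNat : Int) * (b.toNat : Int) + pvG f s

lemma pvA_sum (f s : List Char) :
    ((List.range (max f.length s.length)).map (fun (k : Nat) => pvT f s (k : Int))).sum = pvG f s := by
  induction f, s using pvG.induct with
  | case1 => simp [pvG]
  | case2 a f ih =>
      have hmax : max (a :: f).length ([] : List Char).length = max f.length ([] : List Char).length + 1 := by
        simp
      rw [hmax, pvSum_shift]
      have h0 : pvT (a :: f) [] 0 = (a.toNat : Int) := by
        simp only [pvT, List.length_cons, List.length_nil, PySem.List.pyGet?_zero_cons]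
        norm_num
      simp only [Nat.cast_zero, Nat.cast_add, Nat.cast_one, pvT_shift_nil_right, h0, ih, pvG]
  | case3 b s ih =>
      have hmax : max ([] : List Char).length (b :: s).length = max ([] : List Char).length s.length + 1 := by
        simp
      rw [hmax, pvSum_shift]
      have h0 : pvT [] (b :: s) 0 = (b.toNat : Int) := by
        simp only [pvT, List.length_cons, List.length_nil, PySem.List.pyGet?_zero_cons]
        norm_num
      simp only [Nat.cast_zero, Nat.cast_add, Nat.cast_one, pvT_shift_nil_left, h0, ih, pvG]
  | case4 a f b s ih =>
      have hmax : max (a :: f).length (b :: s).length = max f.length s.length + 1 := by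
        simp [Nat.succ_max_succ]
      rw [hmax, pvSum_shift]
      have h0 : pvT (a :: f) (b :: s) 0 = (a.toNat : Int) * (b.toNat : Int) := by
        simp only [pvT, List.length_cons, PySem.List.pyGet?_zero_cons]
        split_ifs <;> first | rfl | (push_cast at *; omega)
      simp only [Nat.cast_zero, Nat.cast_add, Nat.cast_one, pvT_shift, h0, ih, pvG]

lemma pvA_eq (fw sw : String) :
    ascii_sum_char fw sw = pvG fw.toList sw.toList := by
  unfold ascii_sum_char
  simp only []
  set f := fw.toList
  set s := sw.toList
  have hidx : (if (f.length : Int) > (s.length : Int) then (f.length : Int) else (s.length : Int))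
      = ((max f.length s.length : Nat) : Int) := by
    split_ifs <;> push_cast <;> omega
  rw [hidx]
  have hstep : (fun (sum i : Int) =>
      if (f.length : Int) - 1 < i ∧ i ≤ (s.length : Int) - 1 then
        sum + ((PySem.List.pyGet? s i).map (fun c => (c.toNat : Int))).getD 0
      else if (f.length : Int) - 1 ≥ i ∧ i > (s.length : Int) - 1 then
        sum + ((PySem.List.pyGet? f i).map (fun c => (c.toNat : Int))).getD 0
      else
        sum + ((PySem.List.pyGet? f i).map (fun c => (c.toNat : Int))).getD 0
              * ((PySem.List.pyGet? s i).map (fun c => (c.toNat : Int))).getD 0)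
      = fun (sum i : Int) => sum + pvT f s i := by
    funext sum i
    unfold pvT
    split_ifs <;> rfl
  rw [hstep, PySem.List.foldl_add, PySem.List.pyRange_one]
  simp only [Int.sub_zero, Int.toNat_natCast, List.map_map]
  rw [← pvA_sum f s, Int.zero_add]
  congr 1
  apply List.map_congr_left
  intro k _
  simp [Function.comp]

lemma pvB_eq (f s : List Char) :
    ((f.zip s).map (fun ab => (ab.1.toNat : Int) * (ab.2.toNat : Int))).sum
      + (((if f.length > s.length then f else s).drop (min f.length s.length)).map (fun c => (c.toNat : Int))).sum
      = pvG f s := by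
  induction f, s using pvG.induct with
  | case1 => simp [pvG]
  | case2 a f ih =>
      simp only [List.zip_nil_right, List.map_nil, List.sum_nil, List.length_nil, List.length_cons,
        Nat.min_zero, List.drop_zero] at ih ⊢
      have h : (f.length + 1 > 0) = True := by simp
      simp only [h, if_true, gt_iff_lt] at *
      split_ifs at ih with hf
      · simp [pvG, ← ih]
        all_goals ring
      · have : f.length = 0 := by omega
        simp [List.eq_nil_of_length_eq_zero this] at ih ⊢
        simp [pvG, List.eq_nil_of_length_eq_zero this, ← ih]
  | case3 b s ih =>
      simp only [List.zip_nil_left, List.map_nil, List.sum_nil, List.length_nil, List.length_cons,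
        Nat.zero_min, List.drop_zero] at ih ⊢
      have h : ¬ ((0:Nat) > s.length) := by omega
      have h2 : ¬ ((0:Nat) > s.length + 1) := by omega
      simp only [h, h2, if_false, gt_iff_lt] at *
      simp [pvG, ← ih]
      all_goals ring
  | case4 a f b s ih =>
      simp only [List.zip_cons_cons, List.map_cons, List.sum_cons, List.length_cons]
      rcases Nat.lt_or_ge s.length f.length with h | h
      · rw [if_pos (by omega : f.length + 1 > s.length + 1),
            show min (f.length + 1) (s.length + 1) = s.length + 1 from by omega,
            List.drop_succ_cons]
        rw [if_pos (by omega : f.length > s.length),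
            show min f.length s.length = s.length from by omega] at ih
        simp only [pvG]
        rw [← ih]
        ring
      · rw [if_neg (by omega : ¬ (f.length + 1 > s.length + 1)),
            show min (f.length + 1) (s.length + 1) = f.length + 1 from by omega,
            List.drop_succ_cons]
        rw [if_neg (by omega : ¬ (f.length > s.length)),
            show min f.length s.length = f.length from by omega] at ih
        simp only [pvG]
        rw [← ih]
        ring

-- ===== VERDICT (by name: the statement is the Claim_ definition above) =====
theorem ascii_sum_char_spec : Claim_equal_ascii_sum_char := by
  intro fw sw _
  unfold Spec_ascii_sum_char ascii_sum_char_alt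
  rw [pvA_eq]
  exact (pvB_eq fw.toList sw.toList).symm
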